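-- pv_equiv track=rewrite | github.com/ensookim/algorithm | Python/sw/deque.py | q_count
-- ===== SOURCE A (Python) =====
-- from collections import deque
--
-- def q_count(price):
--     result = []
--     q = deque(price)
--
--     while q: #q 가 비어있지않다면
--         count =0
--         current_price=  q.popleft()
--         for next in q:
--             if current_price <= next:
--                 count += 1
--             else:
--                 count += 1
--                 break
--         result.append(count)
--     return result
-- ===== SOURCE B (Python) =====
-- def q_count(price):
--     # Monotonic stack, right-to-left: each stack entry (value, weight) compresses
--     # a run already counted, so each element is pushed/popped once -> O(n).
--     res = []
--     stack = []  # (value, weight), top at the end; values increase bottom -> top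
--     for x in reversed(price):
--         c = 0
--         while stack and stack[-1][0] >= x:
--             c += stack.pop()[1]
--         res.append(c if not stack else c + 1)
--         stack.append((x, c + 1))
--     res.reverse()
--     return res
-- ===== Notes on version B (the rewrite author's own statement) =====
-- stated objective: faster
-- what changed: Replaced A's per-element rescan of the remaining deque with a single right-to-left pass over a weight-compressed monotonic stack, so each element is pushed and popped at most once.
import Mathlib
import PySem

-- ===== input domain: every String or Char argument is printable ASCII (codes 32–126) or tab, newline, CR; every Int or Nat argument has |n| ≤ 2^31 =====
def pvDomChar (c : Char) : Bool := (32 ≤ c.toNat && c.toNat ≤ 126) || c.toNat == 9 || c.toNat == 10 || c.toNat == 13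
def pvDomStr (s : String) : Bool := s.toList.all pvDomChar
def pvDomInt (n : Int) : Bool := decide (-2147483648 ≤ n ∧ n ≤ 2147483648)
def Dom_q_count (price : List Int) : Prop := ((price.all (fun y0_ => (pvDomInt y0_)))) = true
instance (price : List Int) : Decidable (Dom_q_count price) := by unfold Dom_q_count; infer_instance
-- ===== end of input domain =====

-- B counts, per position, the elements up to and including the first strictly smaller
-- one with an O(n) monotonic stack instead of A's O(n^2) rescan of the remaining deque.

-- ===== PORT A =====
-- inner 'for next in q: …' loop of A: scan until an element strictly smaller than c
def cntA (c : Int) : List Int → Int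
  | [] => 0
  | x :: xs => if c ≤ x then 1 + cntA c xs else 1

-- outer 'while q: … popleft …' loop of A
def q_count : List Int → List Int
  | [] => []
  | c :: rest => cntA c rest :: q_count rest

-- ===== PORT B =====
-- B's inner 'while stack and stack[-1][0] >= x: c += stack.pop()[1]'
def popW (x : Int) : List (Int × Int) → Int × List (Int × Int)
  | [] => (0, [])
  | (v, w) :: s =>
      if x ≤ v then
        let r := popW x s
        (w + r.1, r.2)
      else (0, (v, w) :: s)

-- one iteration of B's 'for x in reversed(price)' loop (stack top at the head)
def stepB (acc : List Int × List (Int × Int)) (x : Int) : List Int × List (Int × Int) :=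
  let r := popW x acc.2
  ((if r.2 = [] then r.1 else r.1 + 1) :: acc.1, (x, r.1 + 1) :: r.2)

def q_count_alt (price : List Int) : List Int :=
  (price.reverse.foldl stepB ([], [])).1

-- ===== PRECONDITION & SPEC =====
def Spec_q_count (price : List Int) (out : List Int) : Prop := out = q_count_alt price
instance (price : List Int) (out : List Int) : Decidable (Spec_q_count price out) := by unfold Spec_q_count; infer_instance

-- ===== CLAIM (what is proved, stated in full; the proofs are below) =====
def Claim_equal_q_count : Prop := ∀ (price : List Int), Dom_q_count price → Spec_q_count price (q_count price)

-- ===== LEMMAS AND PROOFS =====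

-- the stack B has after processing a suffix, written as a recursion on that suffix
def stackSpec : List Int → List (Int × Int)
  | [] => []
  | c :: rest =>
      let r := popW c (stackSpec rest)
      (c, r.1 + 1) :: r.2

-- popping with a lower threshold c ≤ x factors through popping with x first
theorem popW_comp (c x : Int) (h : c ≤ x) (s : List (Int × Int)) :
    popW c s = ((popW x s).1 + (popW c (popW x s).2).1, (popW c (popW x s).2).2) := by
  induction s with
  | nil => simp [popW]
  | cons vw s ih =>
    obtain ⟨v, w⟩ := vw
    by_cases hx : x ≤ v
    · have hc : c ≤ v := le_trans h hx
      simp only [popW, if_pos hx, if_pos hc, ih]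
      ring_nf
    · by_cases hc : c ≤ v
      · simp [popW, if_pos hc, if_neg hx]
      · simp [popW, if_neg hc, if_neg hx]

-- the popped weight (plus 1 if the stack is nonempty afterwards) is exactly A's count
theorem cnt_popW (rest : List Int) : ∀ c : Int,
    (if (popW c (stackSpec rest)).2 = [] then (popW c (stackSpec rest)).1
     else (popW c (stackSpec rest)).1 + 1) = cntA c rest := by
  induction rest with
  | nil => intro c; simp [popW, stackSpec, cntA]
  | cons x xs ih =>
    intro c
    by_cases hc : c ≤ x
    · have hcomp := popW_comp c x hc (stackSpec xs)
      simp only [stackSpec, popW, if_pos hc, cntA, ← ih c, hcomp]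
      split <;> ring_nf
    · simp [stackSpec, popW, if_neg hc, cntA]

theorem foldB_spec (price : List Int) :
    price.reverse.foldl stepB ([], []) = (q_count price, stackSpec price) := by
  induction price with
  | nil => simp [q_count, stackSpec]
  | cons c rest ih =>
    simp only [List.reverse_cons, List.foldl_append, ih, List.foldl_cons, List.foldl_nil]
    simp only [stepB, q_count, stackSpec, ← cnt_popW rest c]

-- ===== VERDICT (by name: the statement is the Claim_ definition above) =====
theorem q_count_spec : Claim_equal_q_count := by
  intro price _
  unfold Spec_q_count q_count_alt
  rw [foldB_spec]
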